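-- pv_equiv track=rewrite | github.com/pdepilot/coscharisgroup.com | scripts/remove_preloader.py | strip_preloader_balanced
-- ===== SOURCE A (Python) =====
-- def strip_preloader_balanced(content: str) -> str:
--     idx = content.find('class="preloader"')
--     if idx == -1:
--         return content
--     start = content.rfind("<div", 0, idx)
--     if start == -1:
--         return content
--     i = start
--     depth = 0
--     n = len(content)
--     while i < n:
--         if content.startswith("<div", i):
--             depth += 1
--             gt = content.find(">", i)
--             if gt == -1:
--                 break
--             i = gt + 1
--         elif content.startswith("</div>", i):
--             depth -= 1
--             i += 6
--             if depth == 0: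
--                 while i < n and content[i] in " \r\n\t":
--                     i += 1
--                 return content[:start] + content[i:]
--         else:
--             i += 1
--     return content
-- ===== SOURCE B (Python) =====
-- def strip_preloader_balanced(content: str) -> str:
--     idx = content.find('class="preloader"')
--     if idx == -1:
--         return content
--     start = content.rfind("<div", 0, idx)
--     if start == -1:
--         return content
--     i = start
--     depth = 0
--     # Tag-hopping loop: jump straight to the next '<div' / '</div>' instead of
--     # scanning character by character.
--     while True:
--         p1 = content.find("<div", i)
--         p2 = content.find("</div>", i)
--         if p1 != -1 and (p2 == -1 or p1 < p2):
--             depth += 1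
--             gt = content.find(">", p1)
--             if gt == -1:
--                 return content
--             i = gt + 1
--         elif p2 != -1:
--             depth -= 1
--             i = p2 + 6
--             if depth == 0:
--                 rest = content[i:]
--                 while rest and rest[0] in " \r\n\t":
--                     rest = rest[1:]
--                 return content[:start] + rest
--         else:
--             return content
-- ===== Notes on version B (the rewrite author's own statement) =====
-- stated objective: alternative
-- what changed: The character-by-character depth scan is replaced by a tag-hopping loop that jumps directly to the next opening/closing div-tag occurrence via find, and the trailing-whitespace skip becomes a dropWhile on the tail.
import Mathlib
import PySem

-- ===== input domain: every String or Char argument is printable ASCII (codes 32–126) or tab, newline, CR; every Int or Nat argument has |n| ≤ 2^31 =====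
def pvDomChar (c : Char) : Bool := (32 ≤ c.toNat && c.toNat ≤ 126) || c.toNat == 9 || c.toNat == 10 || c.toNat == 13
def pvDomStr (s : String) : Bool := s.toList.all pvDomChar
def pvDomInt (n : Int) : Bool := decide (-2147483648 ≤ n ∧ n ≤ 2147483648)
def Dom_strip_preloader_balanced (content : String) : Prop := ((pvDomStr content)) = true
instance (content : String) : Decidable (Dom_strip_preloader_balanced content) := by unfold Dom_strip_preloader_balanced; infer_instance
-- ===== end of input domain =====

-- B replaces A's character-by-character depth scan by a tag-hopping loop that jumps
-- straight to the next opening/closing div-tag occurrence (objective: alternative).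

-- ===== PORT A =====
-- A's inner whitespace skip: while i < n and content[i] in " \r\n\t": i += 1
def stripA_skip (s : List Char) (i : Nat) : Nat :=
  if h : i < s.length then
    if s[i] = ' ' ∨ s[i] = '\r' ∨ s[i] = '\n' ∨ s[i] = '\t' then stripA_skip s (i + 1) else i
  else i
termination_by s.length - i
decreasing_by omega

-- A's main while loop; content.startswith(p, i) is ported as startswith on s.drop i,
-- and content.find(">", i) as i + find (s.drop i) ">" (-1 if absent) — both exact.
def stripA_loop (s : List Char) (start i : Nat) (depth : Int) : List Char :=
  if hi : i < s.length then
    if PySem.Chars.startswith (s.drop i) "<div".toList then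
      let gt := PySem.Chars.find (s.drop i) ">".toList
      if gt = -1 then s
      else stripA_loop s start (i + gt.toNat + 1) (depth + 1)
    else if PySem.Chars.startswith (s.drop i) "</div>".toList then
      if depth - 1 = 0 then
        s.take start ++ s.drop (stripA_skip s (i + 6))
      else stripA_loop s start (i + 6) (depth - 1)
    else stripA_loop s start (i + 1) depth
  else s
termination_by s.length - i
decreasing_by all_goals omega

def strip_preloader_balanced (content : String) : String :=
  let s := content.toList
  let idx := PySem.Chars.find s "class=\"preloader\"".toList
  if idx = -1 then content
  else
    let start := PySem.Chars.rfindFrom s "<div".toList 0 (some idx)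
    if start = -1 then content
    else String.ofList (stripA_loop s start.toNat start.toNat 0)

-- ===== PORT B =====
-- B's whitespace skip on the tail: while rest and rest[0] in " \r\n\t": rest = rest[1:]
def stripB_dropWS : List Char → List Char
  | [] => []
  | c :: t => if c = ' ' ∨ c = '\r' ∨ c = '\n' ∨ c = '\t' then stripB_dropWS t else c :: t

-- used by stripB_loop's termination proof
theorem stripB_find_lt {s : List Char} {i : Nat} {sub : List Char} (hsub : sub ≠ [])
    (h : PySem.Chars.find (s.drop i) sub ≠ -1) : i < s.length := by
  have hinf := (PySem.Chars.find_ne_neg_one_iff (s := s.drop i) (sub := sub)).mp h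
  have hne : s.drop i ≠ [] := by
    intro hnil
    rw [hnil] at hinf
    exact hsub (List.eq_nil_of_infix_nil hinf)
  have := List.drop_eq_nil_iff.not.mp hne
  omega

-- B's tag-hopping loop; content.find(p, i) is ported as find on s.drop i (p1 = i + q1 …).
def stripB_loop (s : List Char) (start i : Nat) (depth : Int) : List Char :=
  let q1 := PySem.Chars.find (s.drop i) "<div".toList
  let q2 := PySem.Chars.find (s.drop i) "</div>".toList
  if h1 : q1 ≠ -1 ∧ (q2 = -1 ∨ q1 < q2) then
    let gt := PySem.Chars.find (s.drop (i + q1.toNat)) ">".toList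
    if gt = -1 then s
    else stripB_loop s start (i + q1.toNat + gt.toNat + 1) (depth + 1)
  else if h2 : q2 ≠ -1 then
    if depth - 1 = 0 then
      s.take start ++ stripB_dropWS (s.drop (i + q2.toNat + 6))
    else stripB_loop s start (i + q2.toNat + 6) (depth - 1)
  else s
termination_by s.length - i
decreasing_by
  · have := stripB_find_lt (by decide) h1.1
    omega
  · have := stripB_find_lt (by decide) h2
    omega

def strip_preloader_balanced_alt (content : String) : String :=
  let s := content.toList
  let idx := PySem.Chars.find s "class=\"preloader\"".toList
  if idx = -1 then content
  else
    let start := PySem.Chars.rfindFrom s "<div".toList 0 (some idx)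
    if start = -1 then content
    else String.ofList (stripB_loop s start.toNat start.toNat 0)

-- ===== PRECONDITION & SPEC =====
def Spec_strip_preloader_balanced (content : String) (out : String) : Prop := out = strip_preloader_balanced_alt content
instance (content : String) (out : String) : Decidable (Spec_strip_preloader_balanced content out) := by unfold Spec_strip_preloader_balanced; infer_instance

-- ===== CLAIM (what is proved, stated in full; the proofs are below) =====
def Claim_equal_strip_preloader_balanced : Prop := ∀ (content : String), Dom_strip_preloader_balanced content → Spec_strip_preloader_balanced content (strip_preloader_balanced content)

-- ===== LEMMAS AND PROOFS =====

theorem drop_add (s : List Char) (i j : Nat) : s.drop (i + j) = (s.drop i).drop j := by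
  rw [List.drop_drop]

theorem prefix_drop_lt {s sub : List Char} {i : Nat} (hsub : sub ≠ []) (h : sub <+: s.drop i) :
    i < s.length := by
  have hne : s.drop i ≠ [] := by
    intro hnil
    rw [hnil] at h
    exact hsub (List.prefix_nil.mp h)
  have := List.drop_eq_nil_iff.not.mp hne
  omega

theorem infix_of_prefix_drop {s sub : List Char} {j : Nat} (h : sub <+: s.drop j) : sub <:+: s :=
  h.isInfix.trans (List.drop_suffix j s).isInfix

theorem not_open_of_close {l : List Char} (h : "</div>".toList <+: l) : ¬ "<div".toList <+: l := by
  rcases h with ⟨t2, rfl⟩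
  rintro ⟨t1, e⟩
  have := congrArg (fun l => l[1]?) e
  simp at this

theorem sw_true {l p : List Char} (h : p <+: l) : PySem.Chars.startswith l p = true :=
  (PySem.Chars.startswith_iff _ _).mpr h

theorem sw_false {l p : List Char} (h : ¬ p <+: l) : PySem.Chars.startswith l p = false :=
  Bool.eq_false_iff.mpr (fun hh => h ((PySem.Chars.startswith_iff _ _).mp hh))

theorem A_end (s : List Char) (start i : Nat) (d : Int) (h : s.length ≤ i) :
    stripA_loop s start i d = s := by
  rw [stripA_loop]
  simp [Nat.not_lt.mpr h]

theorem A_step (s : List Char) (start i : Nat) (d : Int) (hi : i < s.length)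
    (hn1 : ¬ "<div".toList <+: s.drop i) (hn2 : ¬ "</div>".toList <+: s.drop i) :
    stripA_loop s start i d = stripA_loop s start (i + 1) d := by
  rw [stripA_loop]
  simp only [dif_pos hi, sw_false hn1, sw_false hn2]
  norm_num

theorem A_skip_many (s : List Char) (start : Nat) (d : Int) :
    ∀ (m i : Nat), (∀ j, j < m → ¬ "<div".toList <+: s.drop (i + j) ∧ ¬ "</div>".toList <+: s.drop (i + j)) →
      stripA_loop s start i d = stripA_loop s start (i + m) d := by
  intro m
  induction m with
  | zero => intro i _; rfl
  | succ m ih =>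
    intro i hno
    by_cases hi : i < s.length
    · have h0 := hno 0 (by omega)
      rw [A_step s start i d hi (by simpa using h0.1) (by simpa using h0.2)]
      have := ih (i + 1) (fun j hj => by
        have := hno (j + 1) (by omega)
        constructor
        · have := this.1; rw [show i + 1 + j = i + (j + 1) by omega]; exact this
        · have := this.2; rw [show i + 1 + j = i + (j + 1) by omega]; exact this)
      rw [this, show i + 1 + m = i + (m + 1) by omega]
    · rw [A_end s start i d (by omega), A_end s start (i + (m + 1)) d (by omega)]

theorem A_open_at (s : List Char) (start i : Nat) (d : Int) (hi : i < s.length)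
    (hpref : "<div".toList <+: s.drop i) :
    stripA_loop s start i d =
      (if PySem.Chars.find (s.drop i) ">".toList = -1 then s
       else stripA_loop s start (i + (PySem.Chars.find (s.drop i) ">".toList).toNat + 1) (d + 1)) := by
  rw [stripA_loop]
  simp only [dif_pos hi, sw_true hpref]
  norm_num

theorem A_close_at (s : List Char) (start i : Nat) (d : Int) (hi : i < s.length)
    (hpref : "</div>".toList <+: s.drop i) :
    stripA_loop s start i d =
      (if d - 1 = 0 then s.take start ++ s.drop (stripA_skip s (i + 6))
       else stripA_loop s start (i + 6) (d - 1)) := by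
  rw [stripA_loop]
  simp only [dif_pos hi, sw_true hpref, sw_false (not_open_of_close hpref)]
  norm_num

theorem B_end (s : List Char) (start i : Nat) (d : Int) (h : s.length ≤ i) :
    stripB_loop s start i d = s := by
  have hnil : s.drop i = [] := List.drop_eq_nil_of_le h
  have h1 : PySem.Chars.find (s.drop i) "<div".toList = -1 := by
    rw [PySem.Chars.find_eq_neg_one_iff, hnil]
    intro hinf
    simpa using List.eq_nil_of_infix_nil hinf
  have h2 : PySem.Chars.find (s.drop i) "</div>".toList = -1 := by
    rw [PySem.Chars.find_eq_neg_one_iff, hnil]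
    intro hinf
    simpa using List.eq_nil_of_infix_nil hinf
  rw [stripB_loop]
  simp only [h1, h2]
  norm_num

theorem B_open (s : List Char) (start i : Nat) (d : Int)
    (h1 : PySem.Chars.find (s.drop i) "<div".toList ≠ -1 ∧
      (PySem.Chars.find (s.drop i) "</div>".toList = -1 ∨
        PySem.Chars.find (s.drop i) "<div".toList < PySem.Chars.find (s.drop i) "</div>".toList)) :
    stripB_loop s start i d =
      (if PySem.Chars.find (s.drop (i + (PySem.Chars.find (s.drop i) "<div".toList).toNat)) ">".toList = -1 then s
       else stripB_loop s start
         (i + (PySem.Chars.find (s.drop i) "<div".toList).toNat +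
           (PySem.Chars.find (s.drop (i + (PySem.Chars.find (s.drop i) "<div".toList).toNat)) ">".toList).toNat + 1)
         (d + 1)) := by
  rw [stripB_loop]
  simp only [dif_pos h1]

theorem B_close (s : List Char) (start i : Nat) (d : Int)
    (hn1 : ¬ (PySem.Chars.find (s.drop i) "<div".toList ≠ -1 ∧
      (PySem.Chars.find (s.drop i) "</div>".toList = -1 ∨
        PySem.Chars.find (s.drop i) "<div".toList < PySem.Chars.find (s.drop i) "</div>".toList)))
    (h2 : PySem.Chars.find (s.drop i) "</div>".toList ≠ -1) :
    stripB_loop s start i d =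
      (if d - 1 = 0 then
        s.take start ++ stripB_dropWS (s.drop (i + (PySem.Chars.find (s.drop i) "</div>".toList).toNat + 6))
       else stripB_loop s start (i + (PySem.Chars.find (s.drop i) "</div>".toList).toNat + 6) (d - 1)) := by
  rw [stripB_loop]
  simp only [dif_neg hn1, dif_pos h2]

theorem B_dead (s : List Char) (start i : Nat) (d : Int)
    (hn1 : PySem.Chars.find (s.drop i) "<div".toList = -1)
    (hn2 : PySem.Chars.find (s.drop i) "</div>".toList = -1) :
    stripB_loop s start i d = s := by
  rw [stripB_loop]
  simp only [hn1, hn2]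
  norm_num

theorem skip_eq (s : List Char) : ∀ j, s.drop (stripA_skip s j) = stripB_dropWS (s.drop j) := by
  suffices H : ∀ k j, s.length - j ≤ k → s.drop (stripA_skip s j) = stripB_dropWS (s.drop j) from
    fun j => H s.length j (by omega)
  intro k
  induction k with
  | zero =>
    intro j hj
    have hlen : s.length ≤ j := by omega
    rw [stripA_skip]
    simp [List.drop_eq_nil_of_le hlen, Nat.not_lt.mpr hlen, stripB_dropWS]
  | succ k ih =>
    intro j hj
    by_cases h : j < s.length
    · have hd : s.drop j = s[j] :: s.drop (j + 1) := List.drop_eq_getElem_cons h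
      rw [stripA_skip, hd, stripB_dropWS]
      by_cases hc : s[j] = ' ' ∨ s[j] = '\r' ∨ s[j] = '\n' ∨ s[j] = '\t'
      · simp only [h, hc, dif_pos, if_pos]
        exact ih (j + 1) (by omega)
      · simp [h, hc, ← hd]
    · have hlen : s.length ≤ j := by omega
      rw [stripA_skip]
      simp [List.drop_eq_nil_of_le hlen, Nat.not_lt.mpr hlen, stripB_dropWS]

theorem loop_eq (s : List Char) (start : Nat) :
    ∀ i depth, stripA_loop s start i depth = stripB_loop s start i depth := by
  suffices H : ∀ k i d, s.length - i ≤ k → stripA_loop s start i d = stripB_loop s start i d from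
    fun i d => H s.length i d (by omega)
  intro k
  induction k with
  | zero =>
    intro i d h
    rw [A_end s start i d (by omega), B_end s start i d (by omega)]
  | succ k ih =>
    intro i d hik
    by_cases hige : s.length ≤ i
    · rw [A_end s start i d hige, B_end s start i d hige]
    have hi : i < s.length := by omega
    by_cases h1 : PySem.Chars.find (s.drop i) "<div".toList ≠ -1 ∧
        (PySem.Chars.find (s.drop i) "</div>".toList = -1 ∨
          PySem.Chars.find (s.drop i) "<div".toList < PySem.Chars.find (s.drop i) "</div>".toList)
    · -- open-tag case: the next token after i is a '<div'
      obtain ⟨h1a, h1b⟩ := h1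
      have hq10 : 0 ≤ PySem.Chars.find (s.drop i) "<div".toList := by
        have := PySem.Chars.neg_one_le_find (s := s.drop i) (sub := "<div".toList)
        omega
      have hspec := PySem.Chars.find_spec (s := s.drop i) (sub := "<div".toList) hq10
      have hpref : "<div".toList <+: s.drop (i + (PySem.Chars.find (s.drop i) "<div".toList).toNat) := by
        rw [drop_add]; exact hspec.1
      have hno : ∀ j, j < (PySem.Chars.find (s.drop i) "<div".toList).toNat →
          ¬ "<div".toList <+: s.drop (i + j) ∧ ¬ "</div>".toList <+: s.drop (i + j) := by
        intro j hj
        constructor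
        · rw [drop_add]; exact hspec.2 j hj
        · rcases h1b with h2n | hlt
          · intro hp
            rw [drop_add] at hp
            exact ((PySem.Chars.find_eq_neg_one_iff _ _).mp h2n) (infix_of_prefix_drop hp)
          · have hq20 : 0 ≤ PySem.Chars.find (s.drop i) "</div>".toList := le_of_lt (lt_of_le_of_lt hq10 hlt)
            have hspec2 := PySem.Chars.find_spec (s := s.drop i) (sub := "</div>".toList) hq20
            rw [drop_add]
            exact hspec2.2 j (by omega)
      rw [A_skip_many s start d _ i hno]
      have him : i + (PySem.Chars.find (s.drop i) "<div".toList).toNat < s.length :=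
        prefix_drop_lt (by decide) hpref
      rw [A_open_at s start _ d him hpref, drop_add,
        B_open s start i d ⟨h1a, h1b⟩, drop_add]
      by_cases hgt : PySem.Chars.find ((s.drop i).drop (PySem.Chars.find (s.drop i) "<div".toList).toNat) ">".toList = -1
      · rw [if_pos hgt, if_pos hgt]
      · rw [if_neg hgt, if_neg hgt]
        exact ih _ _ (by omega)
    · by_cases h2 : PySem.Chars.find (s.drop i) "</div>".toList ≠ -1
      · -- close-tag case: the next token after i is a '</div>'
        have hq20 : 0 ≤ PySem.Chars.find (s.drop i) "</div>".toList := by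
          have := PySem.Chars.neg_one_le_find (s := s.drop i) (sub := "</div>".toList)
          omega
        have hspec2 := PySem.Chars.find_spec (s := s.drop i) (sub := "</div>".toList) hq20
        have hpref2 : "</div>".toList <+: s.drop (i + (PySem.Chars.find (s.drop i) "</div>".toList).toNat) := by
          rw [drop_add]; exact hspec2.1
        have hno : ∀ j, j < (PySem.Chars.find (s.drop i) "</div>".toList).toNat →
            ¬ "<div".toList <+: s.drop (i + j) ∧ ¬ "</div>".toList <+: s.drop (i + j) := by
          intro j hj
          refine ⟨?_, by rw [drop_add]; exact hspec2.2 j hj⟩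
          by_cases hq1 : PySem.Chars.find (s.drop i) "<div".toList = -1
          · intro hp
            rw [drop_add] at hp
            exact ((PySem.Chars.find_eq_neg_one_iff _ _).mp hq1) (infix_of_prefix_drop hp)
          · have hq10 : 0 ≤ PySem.Chars.find (s.drop i) "<div".toList := by
              have := PySem.Chars.neg_one_le_find (s := s.drop i) (sub := "<div".toList)
              omega
            have hle : PySem.Chars.find (s.drop i) "</div>".toList ≤ PySem.Chars.find (s.drop i) "<div".toList := by
              by_contra hcon
              exact h1 ⟨hq1, Or.inr (by omega)⟩
            have hspec1 := PySem.Chars.find_spec (s := s.drop i) (sub := "<div".toList) hq10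
            rw [drop_add]
            exact hspec1.2 j (by omega)
        rw [A_skip_many s start d _ i hno]
        have him : i + (PySem.Chars.find (s.drop i) "</div>".toList).toNat < s.length :=
          prefix_drop_lt (by decide) hpref2
        rw [A_close_at s start _ d him hpref2, B_close s start i d h1 h2]
        by_cases hd : d - 1 = 0
        · rw [if_pos hd, if_pos hd, skip_eq]
        · rw [if_neg hd, if_neg hd]
          exact ih _ _ (by omega)
      · -- no token after i at all: both fall through and return the input
        push Not at h2
        have hq1 : PySem.Chars.find (s.drop i) "<div".toList = -1 := by
          by_contra hq1
          exact h1 ⟨hq1, Or.inl h2⟩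
        have hno : ∀ j, j < s.length - i →
            ¬ "<div".toList <+: s.drop (i + j) ∧ ¬ "</div>".toList <+: s.drop (i + j) := by
          intro j _
          constructor
          · intro hp
            rw [drop_add] at hp
            exact ((PySem.Chars.find_eq_neg_one_iff _ _).mp hq1) (infix_of_prefix_drop hp)
          · intro hp
            rw [drop_add] at hp
            exact ((PySem.Chars.find_eq_neg_one_iff _ _).mp h2) (infix_of_prefix_drop hp)
        rw [A_skip_many s start d _ i hno, A_end s start _ d (by omega), B_dead s start i d hq1 h2]

-- ===== VERDICT (by name: the statement is the Claim_ definition above) =====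
theorem strip_preloader_balanced_spec : Claim_equal_strip_preloader_balanced := by
  intro content _
  unfold Spec_strip_preloader_balanced strip_preloader_balanced strip_preloader_balanced_alt
  simp only
  split_ifs <;> simp [loop_eq]
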